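-- pv_equiv track=rewrite | github.com/doublemover/Slopjective-C | scripts/check_m263_c002_registration_descriptor_lowering_and_multi_image_root_emission_core_feature_implementation.py | make_identifier_safe_suffix
-- ===== SOURCE A (Python) =====
-- def make_identifier_safe_suffix(text: str) -> str:
--     safe = []
--     previous_underscore = False
--     for ch in text:
--         keep = ch.isalnum()
--         emitted = ch if keep else "_"
--         if emitted == "_":
--             if previous_underscore:
--                 continue
--             previous_underscore = True
--         else:
--             previous_underscore = False
--         safe.append(emitted)
--     value = "".join(safe).strip("_")
--     return value or "symbol"
-- ===== SOURCE B (Python) =====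
-- import re
--
-- def make_identifier_safe_suffix(text: str) -> str:
--     mapped = "".join(c if c.isalnum() else "_" for c in text)
--     collapsed = re.sub("_+", "_", mapped)
--     return collapsed.strip("_") or "symbol"
-- ===== Notes on version B (the rewrite author's own statement) =====
-- stated objective: simpler
-- what changed: Replaced the single stateful loop (previous_underscore flag with continue) by a stateless map pass (alnum-or-underscore) followed by a regex collapse of underscore runs and a strip; no running flag remains.
import Mathlib
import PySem

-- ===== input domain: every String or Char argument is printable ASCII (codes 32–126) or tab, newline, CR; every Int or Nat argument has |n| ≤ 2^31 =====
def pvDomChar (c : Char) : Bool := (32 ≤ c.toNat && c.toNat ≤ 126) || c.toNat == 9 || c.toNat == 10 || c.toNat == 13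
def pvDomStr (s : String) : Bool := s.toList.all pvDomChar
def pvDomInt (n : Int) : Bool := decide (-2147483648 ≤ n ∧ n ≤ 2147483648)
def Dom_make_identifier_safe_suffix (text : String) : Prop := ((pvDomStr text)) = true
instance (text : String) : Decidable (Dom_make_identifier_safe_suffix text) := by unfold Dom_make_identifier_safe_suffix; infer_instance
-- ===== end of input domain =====

-- B replaces A's single stateful loop (previous_underscore flag) by a stateless map pass,
-- a collapse of underscore runs, and a strip — simpler decomposition, same O(n) cost.


-- ===== PORT A =====
-- the for-loop over text with state (safe, previous_underscore)
def goA : List Char → List Char → Bool → List Char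
  | [], safe, _ => safe
  | ch :: rest, safe, prev =>
    let keep := PySem.Chars.isalnum ch
    let emitted := if keep then ch else '_'
    if emitted == '_' then
      if prev then goA rest safe prev
      else goA rest (safe ++ [emitted]) true
    else goA rest (safe ++ [emitted]) false

def make_identifier_safe_suffix (text : String) : String :=
  let value := PySem.Chars.stripChars (goA text.toList [] false) ['_']
  if value = [] then "symbol" else String.mk value

-- ===== PORT B =====
-- re.sub("_+", "_", s): ported by hand, exact for this pattern — each maximal run of '_'
-- becomes a single '_', every other character is copied
def collapseUnd : List Char → List Char
  | [] => []
  | c :: cs =>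
    if c == '_' then '_' :: collapseUnd (cs.dropWhile (· == '_'))
    else c :: collapseUnd cs
termination_by cs => cs.length
decreasing_by
  · exact Nat.lt_succ_of_le (List.length_dropWhile_le _ _)
  · simp

def make_identifier_safe_suffix_alt (text : String) : String :=
  let mapped := text.toList.map (fun c => if PySem.Chars.isalnum c then c else '_')
  let collapsed := collapseUnd mapped
  let value := PySem.Chars.stripChars collapsed ['_']
  if value = [] then "symbol" else String.mk value

-- ===== PRECONDITION & SPEC =====
def Spec_make_identifier_safe_suffix (text : String) (out : String) : Prop := out = make_identifier_safe_suffix_alt text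
instance (text : String) (out : String) : Decidable (Spec_make_identifier_safe_suffix text out) := by unfold Spec_make_identifier_safe_suffix; infer_instance

-- ===== CLAIM (what is proved, stated in full; the proofs are below) =====
def Claim_equal_make_identifier_safe_suffix : Prop := ∀ (text : String), Dom_make_identifier_safe_suffix text → Spec_make_identifier_safe_suffix text (make_identifier_safe_suffix text)

-- ===== LEMMAS AND PROOFS =====
-- A's interleaved loop equals map-then-collapse: with prev set, leading underscores of the
-- remainder are skipped, which is exactly a dropWhile in front of the collapse.
theorem goA_eq_collapse (cs : List Char) : ∀ (acc : List Char) (prev : Bool),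
    goA cs acc prev =
      acc ++ collapseUnd
        (if prev then (cs.map (fun c => if PySem.Chars.isalnum c then c else '_')).dropWhile (· == '_')
         else cs.map (fun c => if PySem.Chars.isalnum c then c else '_')) := by
  induction cs with
  | nil => intro acc prev; cases prev <;> simp [goA, collapseUnd]
  | cons c rest ih =>
    intro acc prev
    by_cases h : (if PySem.Chars.isalnum c then c else '_') = '_'
    · cases prev <;>
        simp [goA, h, ih, collapseUnd]
    · cases prev <;>
        simp [goA, h, ih, collapseUnd]

-- ===== VERDICT (by name: the statement is the Claim_ definition above) =====
theorem make_identifier_safe_suffix_spec : Claim_equal_make_identifier_safe_suffix := by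
  intro text _
  unfold Spec_make_identifier_safe_suffix make_identifier_safe_suffix make_identifier_safe_suffix_alt
  simp [goA_eq_collapse]
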